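-- pv_equiv track=rewrite | github.com/Bekhzod-ds/Python--MAAB | lesson-6/homework/lesson6.py | modify_string_with_underscores
-- ===== SOURCE A (Python) =====
-- def modify_string_with_underscores(txt):
--     result = []
--     i = 0
--     skip_next = False
--     vowels = 'aeiouAEIOU'
--
--     while i < len(txt):
--         result.append(txt[i])
--         if (i + 1) % 3 == 0 and txt[i] not in vowels:
--             if i + 1 < len(txt) and txt[i + 1] != '_':
--                 result.append('_')
--         i += 1
--     return ''.join(result).rstrip('_')
-- ===== SOURCE B (Python) =====
-- def modify_string_with_underscores(txt):
--     vowels = 'aeiouAEIOU'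
--     groups = [txt[i:i + 3] for i in range(0, len(txt), 3)]
--     parts = []
--     for k, g in enumerate(groups):
--         parts.append(g)
--         if len(g) == 3 and g[-1] not in vowels and k + 1 < len(groups) and groups[k + 1][0] != '_':
--             parts.append('_')
--     return ''.join(parts).rstrip('_')
-- ===== Notes on version B (the rewrite author's own statement) =====
-- stated objective: alternative
-- what changed: B splits the text into fixed chunks of 3 and decides each underscore from a whole chunk and a one-chunk lookahead, instead of A's per-character while loop with a modulo index test.
import Mathlib
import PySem

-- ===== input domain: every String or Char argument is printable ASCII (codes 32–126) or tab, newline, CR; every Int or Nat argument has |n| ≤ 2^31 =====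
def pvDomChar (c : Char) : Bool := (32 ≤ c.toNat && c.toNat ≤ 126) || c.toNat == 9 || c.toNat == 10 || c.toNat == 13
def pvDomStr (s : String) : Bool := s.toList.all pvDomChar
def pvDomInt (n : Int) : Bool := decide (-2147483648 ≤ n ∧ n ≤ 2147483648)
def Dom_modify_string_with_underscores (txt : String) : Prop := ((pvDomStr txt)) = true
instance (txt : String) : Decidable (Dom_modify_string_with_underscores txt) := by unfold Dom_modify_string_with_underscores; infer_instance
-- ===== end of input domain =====

-- B rebuilds the string from 3-character chunks with a one-chunk lookahead instead of A's
-- per-character loop with a modulo test (objective: alternative decomposition, same cost).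


def pvVowels : List Char := ['a', 'e', 'i', 'o', 'u', 'A', 'E', 'I', 'O', 'U']

-- ''.join(...).rstrip('_') — single-char rstrip, ported by hand (exact: drops trailing '_')
def pvRstripU (cs : List Char) : List Char :=
  ((cs.reverse).dropWhile (fun c => c == '_')).reverse

-- ===== PORT A =====
-- A's while loop: i is the running index, the remaining suffix of txt drives the recursion
-- (i < len(txt) ↔ the suffix is nonempty; txt[i] is its head, txt[i+1] its second element).
def pvLoopA (i : Nat) : List Char → List Char
  | [] => []
  | c :: rest =>
    c :: ((if (i + 1) % 3 == 0 && !(pvVowels.contains c) then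
             (if (match rest with | [] => false | d :: _ => d != '_') then ['_'] else [])
           else []) ++ pvLoopA (i + 1) rest)

def modify_string_with_underscores (txt : String) : String :=
  String.ofList (pvRstripU (pvLoopA 0 txt.toList))

-- ===== PORT B =====
-- groups = [txt[i:i+3] for i in range(0, len(txt), 3)]
def pvChunks3 : List Char → List (List Char)
  | [] => []
  | a :: b :: c :: rest => [a, b, c] :: pvChunks3 rest
  | l => [l]

-- the for-loop over groups with a one-group lookahead (k+1 < len(groups) ↔ a next group exists)
def pvLoopB : List (List Char) → List Char
  | [] => []
  | [g] => g
  | g :: g' :: rest =>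
    g ++ (if g.length == 3 && !(pvVowels.contains (g.getLastD ' ')) && (g'.headD ' ' != '_')
          then ['_'] else []) ++ pvLoopB (g' :: rest)

def modify_string_with_underscores_alt (txt : String) : String :=
  String.ofList (pvRstripU (pvLoopB (pvChunks3 txt.toList)))

-- ===== PRECONDITION & SPEC =====
def Spec_modify_string_with_underscores (txt : String) (out : String) : Prop := out = modify_string_with_underscores_alt txt
instance (txt : String) (out : String) : Decidable (Spec_modify_string_with_underscores txt out) := by unfold Spec_modify_string_with_underscores; infer_instance

-- ===== CLAIM (what is proved, stated in full; the proofs are below) =====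
def Claim_equal_modify_string_with_underscores : Prop := ∀ (txt : String), Dom_modify_string_with_underscores txt → Spec_modify_string_with_underscores txt (modify_string_with_underscores txt)

-- ===== LEMMAS AND PROOFS =====

-- one step of A's while loop (definitional; used by the proofs below)
theorem pvLoopA_cons (i : Nat) (c : Char) (rest : List Char) :
    pvLoopA i (c :: rest) = c :: ((if (i + 1) % 3 == 0 && !(pvVowels.contains c) then
      (if (match rest with | [] => false | d :: _ => d != '_') then ['_'] else []) else [])
      ++ pvLoopA (i + 1) rest) := rfl

-- the first chunk of a nonempty list starts with its head
theorem pvChunks3_cons_head (d : Char) (t : List Char) :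
    ∃ g tl, pvChunks3 (d :: t) = (d :: g) :: tl := by
  match t with
  | [] => exact ⟨[], [], rfl⟩
  | [e] => exact ⟨[e], [], rfl⟩
  | e :: f :: r => exact ⟨[e, f], pvChunks3 r, rfl⟩

theorem pvKey : ∀ (cs : List Char) (i : Nat), i % 3 = 0 →
    pvLoopA i cs = pvLoopB (pvChunks3 cs)
  | [], i, h => rfl
  | [a], i, h => by
    have h1 : (i + 1) % 3 = 1 := by omega
    simp [pvLoopA, pvChunks3, pvLoopB, h1]
  | [a, b], i, h => by
    have h1 : (i + 1) % 3 = 1 := by omega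
    have h2 : (i + 1 + 1) % 3 = 2 := by omega
    simp [pvLoopA, pvChunks3, pvLoopB, h1, h2]
  | a :: b :: c :: rest, i, h => by
    have h1 : (i + 1) % 3 = 1 := by omega
    have h2 : (i + 1 + 1) % 3 = 2 := by omega
    have h3 : (i + 1 + 1 + 1) % 3 = 0 := by omega
    match rest with
    | [] =>
      simp [pvLoopA, pvChunks3, pvLoopB, h1, h2, h3]
    | d :: rest2 =>
      obtain ⟨g, tl, hg⟩ := pvChunks3_cons_head d rest2
      have ih := pvKey (d :: rest2) (i + 1 + 1 + 1) h3
      rw [hg] at ih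
      rw [pvLoopA_cons, pvLoopA_cons, pvLoopA_cons, ih, h1, h2, h3,
        show pvChunks3 (a :: b :: c :: d :: rest2) = [a, b, c] :: pvChunks3 (d :: rest2) from rfl,
        hg]
      simp only [pvLoopB]
      by_cases hc : pvVowels.contains c <;> by_cases hd : d = '_' <;> simp_all

-- ===== VERDICT (by name: the statement is the Claim_ definition above) =====
theorem modify_string_with_underscores_spec : Claim_equal_modify_string_with_underscores := by
  intro txt _
  unfold Spec_modify_string_with_underscores modify_string_with_underscores
    modify_string_with_underscores_alt
  rw [pvKey txt.toList 0 rfl]
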